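-- pv_equiv track=rewrite | github.com/zzammuel/MCM_python | data_functions.py | rewrite_partition
-- ===== SOURCE A (Python) =====
-- def rewrite_partition(MCM, n):
--     string = ""
--     for i in range(n):
--         for key, val in MCM.items():
--             binary = bin(val).replace("0b", "")
--             binary = '0' * (n - len(binary)) + binary
--             if binary[i] == '1':
--                 string += str(key) + "_"
--                 break
--     return string[:-1]
-- ===== SOURCE B (Python) =====
-- def rewrite_partition(MCM, n):
--     result = [None] * n if n > 0 else []
--     for key, val in MCM.items():
--         binary = format(val, 'b')
--         binary = '0' * (n - len(binary)) + binary
--         result = [str(key) if r is None and c == '1' else r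
--                   for r, c in zip(result, binary)]
--     return '_'.join(r for r in result if r is not None)
-- ===== Notes on version B (the rewrite author's own statement) =====
-- stated objective: alternative
-- what changed: A loops over columns 0..n-1 and rescans the whole dict per column, re-formatting each value's binary string every time; B makes a single pass over the dict items, computing each value's padded binary once and filling a per-column first-key table, then joins the filled entries.
import Mathlib
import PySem

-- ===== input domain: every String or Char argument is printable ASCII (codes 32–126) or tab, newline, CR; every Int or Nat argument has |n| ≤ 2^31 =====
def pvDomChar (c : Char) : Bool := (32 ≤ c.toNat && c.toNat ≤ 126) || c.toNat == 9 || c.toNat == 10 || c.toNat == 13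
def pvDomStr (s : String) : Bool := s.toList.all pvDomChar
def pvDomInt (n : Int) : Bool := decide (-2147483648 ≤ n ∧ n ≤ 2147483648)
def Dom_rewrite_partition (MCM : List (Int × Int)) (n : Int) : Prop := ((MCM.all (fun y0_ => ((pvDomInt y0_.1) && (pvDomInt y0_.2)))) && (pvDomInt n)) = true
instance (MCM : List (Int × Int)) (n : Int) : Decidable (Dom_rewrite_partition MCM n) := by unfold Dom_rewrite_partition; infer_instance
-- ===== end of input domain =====

-- B inverts the loop nesting: one pass over the dict filling a per-column first-key table,
-- instead of rescanning all items for every column (objective: alternative; same return value).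

-- ===== PORT A =====
-- binary = bin(val).replace("0b", ""); binary = '0' * (n - len(binary)) + binary
def pvBinPad (n : Int) (val : Int) : List Char :=
  let binary := PySem.Int.toBinChars val
  PySem.List.pyRepeat ['0'] (n - (binary.length : Int)) ++ binary

-- the inner 'for key, val in MCM.items(): … if binary[i] == '1': …; break'
def pvInnerA (n i : Int) : List (Int × Int) → Option Int
  | [] => none
  | (key, val) :: rest =>
      if PySem.List.pyGet? (pvBinPad n val) i = some '1' then some key
      else pvInnerA n i rest

def rewrite_partition (MCM : List (Int × Int)) (n : Int) : String :=
  let items := (PySem.Dict.ofList MCM).items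
  let string : List Char :=
    (PySem.List.pyRange 0 n 1).foldl (fun s i =>
      match pvInnerA n i items with
      | some key => s ++ PySem.Int.toChars key ++ ['_']
      | none => s) []
  String.ofList (PySem.List.slice string none (some (-1)))   -- string[:-1]

-- ===== PORT B =====
-- result = [str(key) if r is None and c == '1' else r for r, c in zip(result, binary)]
def pvFillB (n : Int) (res : List (Option (List Char))) (kv : Int × Int) : List (Option (List Char)) :=
  (res.zip (pvBinPad n kv.2)).map (fun rc =>
    if rc.1 = none ∧ rc.2 = '1' then some (PySem.Int.toChars kv.1) else rc.1)

def rewrite_partition_alt (MCM : List (Int × Int)) (n : Int) : String :=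
  let init : List (Option (List Char)) :=
    if n > 0 then List.replicate n.toNat none else []          -- [None] * n if n > 0 else []
  let result := ((PySem.Dict.ofList MCM).items).foldl (pvFillB n) init
  String.ofList (PySem.Chars.join ['_'] (result.filterMap id)) -- '_'.join(r for r in result if r is not None)

-- ===== PRECONDITION & SPEC =====
def Spec_rewrite_partition (MCM : List (Int × Int)) (n : Int) (out : String) : Prop := out = rewrite_partition_alt MCM n
instance (MCM : List (Int × Int)) (n : Int) (out : String) : Decidable (Spec_rewrite_partition MCM n out) := by unfold Spec_rewrite_partition; infer_instance

-- ===== CLAIM (what is proved, stated in full; the proofs are below) =====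
def Claim_equal_rewrite_partition : Prop := ∀ (MCM : List (Int × Int)) (n : Int), Dom_rewrite_partition MCM n → Spec_rewrite_partition MCM n (rewrite_partition MCM n)

-- ===== LEMMAS AND PROOFS =====

lemma pvBinPad_len (n val : Int) : n.toNat ≤ (pvBinPad n val).length := by
  simp [pvBinPad, PySem.List.pyRepeat_singleton]
  omega

-- the first key (as chars) whose padded binary has a '1' in column i
def pvFirst (n : Int) (i : Nat) (L : List (Int × Int)) : Option (List Char) :=
  (pvInnerA n (i : Int) L).map PySem.Int.toChars

lemma pvFillB_len (n : Int) (res : List (Option (List Char))) (kv : Int × Int)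
    (hle : res.length ≤ n.toNat) : (pvFillB n res kv).length = res.length := by
  have := pvBinPad_len n kv.2
  simp [pvFillB]
  omega

lemma pvFillB_get (n : Int) (res : List (Option (List Char))) (kv : Int × Int)
    (hle : res.length ≤ n.toNat) (i : Nat) (h : i < res.length) :
    (pvFillB n res kv)[i]? =
      some (match res[i] with
            | some s => some s
            | none => if PySem.List.pyGet? (pvBinPad n kv.2) (i : Int) = some '1'
                      then some (PySem.Int.toChars kv.1) else none) := by
  have hb := pvBinPad_len n kv.2
  have hib : i < (pvBinPad n kv.2).length := by omega
  have hz : i < (res.zip (pvBinPad n kv.2)).length := by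
    simp [List.length_zip]; omega
  simp [pvFillB, h, hib]
  rcases hres : res[i] with _ | s
  · by_cases hc : (pvBinPad n kv.2)[i] = '1' <;> simp [hc]
  · simp

lemma pvFold_len (n : Int) (L : List (Int × Int)) :
    ∀ res : List (Option (List Char)), res.length ≤ n.toNat →
      (L.foldl (pvFillB n) res).length = res.length := by
  induction L with
  | nil => intro res _; rfl
  | cons kv rest ih =>
    intro res hle
    have h1 := pvFillB_len n res kv hle
    rw [List.foldl_cons, ih _ (by omega), h1]

lemma pvFold_get (n : Int) (L : List (Int × Int)) :
    ∀ (res : List (Option (List Char))) (_ : res.length ≤ n.toNat)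
      (i : Nat) (h : i < res.length),
      (L.foldl (pvFillB n) res)[i]? =
        some (match res[i]'h with
              | some s => some s
              | none => pvFirst n i L) := by
  induction L with
  | nil =>
    intro res hle i h
    simp only [List.foldl_nil, List.getElem?_eq_getElem h, pvFirst, pvInnerA]
    rcases res[i]'h with _ | s <;> rfl
  | cons kv rest ih =>
    intro res hle i h
    have h1 := pvFillB_len n res kv hle
    rw [List.foldl_cons, ih _ (by omega) i (by omega)]
    have hstep := pvFillB_get n res kv hle i h
    have hstep' : (pvFillB n res kv)[i]'(by omega) =
        (match res[i]'h with
         | some s => some s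
         | none => if PySem.List.pyGet? (pvBinPad n kv.2) (i : Int) = some '1'
                   then some (PySem.Int.toChars kv.1) else none) := by
      have := List.getElem?_eq_getElem (l := pvFillB n res kv) (i := i) (by omega)
      rw [this] at hstep
      exact Option.some.inj hstep
    rw [hstep']
    rcases hres : res[i]'h with _ | s
    · rcases kv with ⟨key, val⟩
      simp only [pvFirst, pvInnerA, PySem.List.pyGet?_natCast]
      by_cases hc : (pvBinPad n val)[i]? = some '1' <;> simp [hc]
    · rfl

-- a flatMap over optional hits is a flatMap over the filterMap
lemma pvFlatMap_option (l : List Nat) (f : Nat → Option (List Char)) :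
    l.flatMap (fun i => match f i with | some cs => cs ++ ['_'] | none => []) =
      (l.filterMap f).flatMap (fun cs => cs ++ ['_']) := by
  induction l with
  | nil => rfl
  | cons a t ih =>
    rcases hf : f a with _ | b <;> simp [hf, ih]

lemma pvDropLast_join (ss : List (List Char)) :
    (ss.flatMap (· ++ ['_'])).dropLast = PySem.Chars.join ['_'] ss := by
  induction ss with
  | nil => simp [PySem.Chars.join_nil]
  | cons a t ih =>
    cases t with
    | nil => simp [PySem.Chars.join_singleton]
    | cons b u =>
      have hne : List.flatMap (fun x => x ++ ['_']) (b :: u) ≠ [] := by simp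
      rw [PySem.Chars.join_cons_cons, ← ih, List.flatMap_cons,
          List.dropLast_append_of_ne_nil hne, List.append_assoc]

theorem rewrite_partition_spec : Claim_equal_rewrite_partition := by
  intro MCM n _
  show String.ofList (PySem.List.slice
      ((PySem.List.pyRange 0 n 1).foldl (fun s i =>
        match pvInnerA n i ((PySem.Dict.ofList MCM).items) with
        | some key => s ++ PySem.Int.toChars key ++ ['_']
        | none => s) []) none (some (-1))) =
    String.ofList (PySem.Chars.join ['_']
      ((((PySem.Dict.ofList MCM).items).foldl (pvFillB n)
        (if n > 0 then List.replicate n.toNat none else [])).filterMap id))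
  set L := (PySem.Dict.ofList MCM).items with hL
  by_cases hn : n > 0
  case neg =>
    have h0 : PySem.List.pyRange 0 n 1 = [] := PySem.List.pyRange_one_eq_nil (by omega)
    have hfold : L.foldl (pvFillB n) [] = [] :=
      List.eq_nil_of_length_eq_zero (by simpa using pvFold_len n L [] (by simp))
    simp [h0, hn, hfold, PySem.Chars.join_nil, PySem.List.slice_to_neg_one]
  case pos =>
    set m := n.toNat with hm
    have hcast : (m : Int) = n := by omega
    -- B's result is the per-column first-key table
    have hrep : (List.replicate m (none : Option (List Char))).length ≤ n.toNat := by
      rw [List.length_replicate]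
    have hlen : (L.foldl (pvFillB n) (List.replicate m none)).length = m := by
      rw [pvFold_len n L _ hrep]; simp
    have hget : ∀ i (h : i < m),
        (L.foldl (pvFillB n) (List.replicate m none))[i]? = some (pvFirst n i L) := by
      intro i h
      have hi : i < (List.replicate m (none : Option (List Char))).length := by
        rw [List.length_replicate]; exact h
      rw [pvFold_get n L _ hrep i hi]
      simp
    have hres : L.foldl (pvFillB n) (List.replicate m none) =
        (List.range m).map (fun i => pvFirst n i L) := by
      apply List.ext_getElem?
      intro i
      by_cases h : i < m
      · rw [hget i h]; simp [List.getElem?_map, List.getElem?_range h]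
      · have h' : m ≤ i := not_lt.mp h
        have e1 : (L.foldl (pvFillB n) (List.replicate m none)).length ≤ i := by
          rw [hlen]; exact h'
        rw [List.getElem?_eq_none e1, List.getElem?_eq_none (by simpa using h')]
    -- A's string is the flatMap of the hit columns
    have hrange : PySem.List.pyRange 0 n 1 = (List.range m).map (fun k => ((k : Nat) : Int)) := by
      rw [PySem.List.pyRange_one]
      simp only [Int.sub_zero, zero_add]
      rfl
    have hstring :
        (PySem.List.pyRange 0 n 1).foldl (fun s i =>
          match pvInnerA n i L with
          | some key => s ++ PySem.Int.toChars key ++ ['_']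
          | none => s) [] =
        (List.range m).flatMap (fun i =>
          match pvFirst n i L with
          | some cs => cs ++ ['_']
          | none => []) := by
      rw [hrange, List.foldl_map]
      have hcong : (List.range m).foldl (fun s k =>
            match pvInnerA n ((k : Nat) : Int) L with
            | some key => s ++ PySem.Int.toChars key ++ ['_']
            | none => s) [] =
          (List.range m).foldl (fun s k => s ++
            (match pvFirst n k L with
             | some cs => cs ++ ['_']
             | none => [])) [] := by
        apply PySem.List.foldl_congr_mem
        intro acc k _
        simp only [pvFirst]
        rcases pvInnerA n (k : Int) L with _ | key <;> simp
      rw [hcong, PySem.List.foldl_append_eq_flatMap]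
      simp
    rw [if_pos hn, hstring, hres]
    rw [PySem.List.slice_to_neg_one]
    rw [pvFlatMap_option]
    rw [pvDropLast_join]
    simp [List.filterMap_map]
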